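-- pv_equiv track=rewrite | github.com/Anggi-Permana-Harianja/coding_exercise | List/array_shift_2D.py | shift_array
-- ===== SOURCE A (Python) =====
-- def shift_array(array, shift):
--     #flattend the array
--     flat_array = [val for sublist in array for val in sublist]
--
--     #shift flat
--     shifted_array = [0] * len(flat_array)
--     for i in range(len(flat_array)):
--         shifted_array[(i + shift) % len(flat_array)] = flat_array[i]
--
--     #reconstruct back shifted_array
--     results = []
--     tmp = []
--     cols = len(array[0])
--     idx = 0
--     for num in shifted_array:
--         idx += 1
--         tmp.append(num)
--
--         if idx == cols:
--             results.append(tmp)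
--             idx = 0
--             tmp = []
--
--     return results
-- ===== SOURCE B (Python) =====
-- def shift_array(array, shift):
--     flat = [v for row in array for v in row]
--     n = len(flat)
--     cols = len(array[0])
--     if n:
--         s = shift % n
--         flat = flat[n - s:] + flat[:n - s]
--     if cols == 0:
--         return []
--     return [flat[i:i + cols] for i in range(0, (n // cols) * cols, cols)]
-- ===== Notes on version B (the rewrite author's own statement) =====
-- stated objective: simpler
-- what changed: Replaces the element-by-element assignment rotation with a closed-form two-slice rotation (flat[n-s:] + flat[:n-s]) and the idx/tmp accumulator re-chunking loop with fixed-size slice chunks over a range, dropping the trailing partial row via the (n//cols)*cols bound.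
import Mathlib
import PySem

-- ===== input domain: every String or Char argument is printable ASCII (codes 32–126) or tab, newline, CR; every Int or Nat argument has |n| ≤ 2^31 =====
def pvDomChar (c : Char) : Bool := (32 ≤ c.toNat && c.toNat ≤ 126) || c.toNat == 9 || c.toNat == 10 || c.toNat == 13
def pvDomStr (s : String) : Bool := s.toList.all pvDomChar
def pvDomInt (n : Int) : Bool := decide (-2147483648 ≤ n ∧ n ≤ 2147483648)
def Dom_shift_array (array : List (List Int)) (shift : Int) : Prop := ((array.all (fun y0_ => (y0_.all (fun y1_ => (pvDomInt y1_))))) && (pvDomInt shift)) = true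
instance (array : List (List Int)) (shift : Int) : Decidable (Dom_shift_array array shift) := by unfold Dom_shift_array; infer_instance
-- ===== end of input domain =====

-- B replaces A's per-element assignment rotation by a closed-form two-slice rotation and the
-- idx/tmp accumulator re-chunking loop by fixed-size slice chunks over a range (objective: simpler).

-- ===== PORT A =====
-- loop body of A's reconstruction 'for num in shifted_array' loop (state: results, tmp, idx)
def pvStepA (cols : Int) (st : List (List Int) × List Int × Int) (num : Int) :
    List (List Int) × List Int × Int :=
  let idx := st.2.2 + 1
  let tmp := st.2.1 ++ [num]
  if idx = cols then (st.1 ++ [tmp], ([] : List Int), (0 : Int)) else (st.1, tmp, idx)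

def shift_array (array : List (List Int)) (shift : Int) : List (List Int) :=
  let flat_array := array.flatMap (fun sublist => sublist)
  let shifted_array :=
    (PySem.List.pyRange 0 (flat_array.length : Int) 1).foldl
      (fun acc i =>
        PySem.List.pySetD acc (PySem.Int.mod (i + shift) (flat_array.length : Int))
          (PySem.List.pyGetD flat_array i 0))
      (List.replicate flat_array.length 0)
  let cols : Int := ((PySem.List.pyGetD array 0 []).length : Int)
  (shifted_array.foldl (pvStepA cols) ([], [], 0)).1

-- ===== PORT B =====
def shift_array_alt (array : List (List Int)) (shift : Int) : List (List Int) :=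
  let flat := array.flatMap (fun row => row)
  let n : Int := (flat.length : Int)
  let cols : Int := ((PySem.List.pyGetD array 0 []).length : Int)
  let flat2 :=
    if n ≠ 0 then
      PySem.List.slice flat (some (n - PySem.Int.mod shift n)) none ++
        PySem.List.slice flat none (some (n - PySem.Int.mod shift n))
    else flat
  if cols = 0 then []
  else
    (PySem.List.pyRange 0 (PySem.Int.floordiv n cols * cols) cols).map
      (fun i => PySem.List.slice flat2 (some i) (some (i + cols)))

-- ===== PRECONDITION & SPEC =====
-- A evaluates array[0] (an IndexError on an empty outer list), so the empty array is excluded.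
def Pre_shift_array (array : List (List Int)) (shift : Int) : Prop := array ≠ []
instance (array : List (List Int)) (shift : Int) : Decidable (Pre_shift_array array shift) := by
  unfold Pre_shift_array; infer_instance

def pvWitness_shift_array : List (List Int) × Int := ([[1, 2], [3, 4]], 3)

def Spec_shift_array (array : List (List Int)) (shift : Int) (out : List (List Int)) : Prop := out = shift_array_alt array shift
instance (array : List (List Int)) (shift : Int) (out : List (List Int)) : Decidable (Spec_shift_array array shift out) := by unfold Spec_shift_array; infer_instance

-- ===== CLAIM (what is proved, stated in full; the proofs are below) =====
def Claim_equal_shift_array : Prop := ∀ (array : List (List Int)) (shift : Int), Dom_shift_array array shift → Pre_shift_array array shift → Spec_shift_array array shift (shift_array array shift)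

-- ===== LEMMAS AND PROOFS =====

-- the common chunk shape: full chunks of size c, trailing partial chunk dropped
def pvChunks (c : Nat) (L : List Int) : List (List Int) :=
  if 0 < c ∧ c ≤ L.length then L.take c :: pvChunks c (L.drop c) else []
termination_by L.length
decreasing_by simp; omega

-- with cols = 0 A's loop never appends a row
lemma foldA_zero (L : List Int) (res : List (List Int)) (tmp : List Int) (idx : Int)
    (h : 0 ≤ idx) : (L.foldl (pvStepA 0) (res, tmp, idx)).1 = res := by
  induction L generalizing tmp idx with
  | nil => rfl
  | cons x L ih =>
    simp only [List.foldl_cons, pvStepA]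
    rw [if_neg (by omega)]
    exact ih _ _ (by omega)

-- with cols > 0 A's loop produces exactly the chunks of (pending ++ input)
lemma foldA_pos (c : Nat) (hc : 0 < c) (L : List Int) (res : List (List Int)) (tmp : List Int)
    (h : tmp.length < c) :
    (L.foldl (pvStepA (c : Int)) (res, tmp, (tmp.length : Int))).1 = res ++ pvChunks c (tmp ++ L) := by
  induction L generalizing res tmp with
  | nil =>
    rw [pvChunks]
    simp only [List.append_nil]
    rw [if_neg (by omega)]
    simp
  | cons x L ih =>
    simp only [List.foldl_cons, pvStepA]
    by_cases hfull : (tmp.length : Int) + 1 = (c : Int)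
    · rw [if_pos hfull]
      have hfullN : tmp.length + 1 = c := by exact_mod_cast hfull
      have hih := ih (res ++ [tmp ++ [x]]) [] hc
      simp only [List.length_nil, Nat.cast_zero, List.nil_append] at hih
      rw [hih]
      have hsplit : tmp ++ x :: L = (tmp ++ [x]) ++ L := by simp
      have hch : pvChunks c ((tmp ++ [x]) ++ L) = (tmp ++ [x]) :: pvChunks c L := by
        rw [pvChunks, if_pos ⟨hc, by simp; omega⟩]
        rw [List.take_left' (by simp; omega), List.drop_left' (by simp; omega)]
      rw [hsplit, hch]
      simp
    · rw [if_neg hfull]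
      have hl : (tmp.length : Int) + 1 = ((tmp ++ [x]).length : Int) := by simp
      rw [hl, ih res (tmp ++ [x]) (by simp; omega)]
      simp

-- closed form of pvChunks
lemma pvChunks_eq_map (c : Nat) (hc : 0 < c) (L : List Int) :
    pvChunks c L = (List.range (L.length / c)).map (fun t => (L.drop (t * c)).take c) := by
  by_cases hlen : c ≤ L.length
  · rw [pvChunks, if_pos ⟨hc, hlen⟩]
    have hq : L.length / c = (L.drop c).length / c + 1 := by
      rw [List.length_drop, Nat.div_eq_sub_div hc hlen]
    rw [hq, List.range_succ_eq_map, List.map_cons, List.map_map]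
    have ih := pvChunks_eq_map c hc (L.drop c)
    rw [ih]
    congr 1
    · simp
    · apply List.map_congr_left
      intro t _
      simp only [Function.comp_apply]
      rw [List.drop_drop, show c + t * c = t.succ * c by simp [Nat.succ_mul]; omega]
  · rw [pvChunks, if_neg (by omega)]
    have : L.length / c = 0 := Nat.div_eq_of_lt (by omega)
    rw [this]
    simp
termination_by L.length
decreasing_by simp; omega

-- B's range-of-slices is pvChunks
lemma sliceChunks (c : Nat) (hc : 0 < c) (L : List Int) :
    (PySem.List.pyRange 0 (PySem.Int.floordiv (L.length : Int) (c : Int) * (c : Int)) (c : Int)).map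
      (fun i => PySem.List.slice L (some i) (some (i + (c : Int)))) = pvChunks c L := by
  have hfd : PySem.Int.floordiv (L.length : Int) (c : Int) * (c : Int) = ((L.length / c * c : Nat) : Int) := by
    rw [PySem.Int.floordiv_natCast]
    push_cast
    ring
  rw [hfd, PySem.List.pyRange_of_pos _ _ (by exact_mod_cast hc), pvChunks_eq_map c hc L]
  set q := L.length / c with hq
  by_cases hq0 : q = 0
  · rw [hq0]
    simp
  · rw [if_pos (by push_cast; exact_mod_cast Nat.mul_pos (Nat.pos_of_ne_zero hq0) hc)]
    have hcnt : ((((q * c : Nat) : Int) - 0 + (c : Int) - 1) / (c : Int)).toNat = q := by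
      have h1 : (((q * c : Nat) : Int) - 0 + (c : Int) - 1) = (((c - 1) + q * c : Nat) : Int) := by
        push_cast [Nat.cast_sub (by omega : 1 ≤ c)]
        ring
      rw [h1, ← Int.natCast_div]
      rw [Nat.add_mul_div_right _ _ hc, Nat.div_eq_of_lt (by omega)]
      simp
    rw [hcnt, List.map_map]
    apply List.map_congr_left
    intro k _
    simp only [Function.comp_apply]
    have hidx : (0 : Int) + (c : Int) * (k : Int) = ((k * c : Nat) : Int) := by push_cast; ring
    rw [hidx, PySem.List.slice_natCast_add L (k * c) c]

-- invariant of A's assignment loop: position (i+shift)%n holds flat[i] once i is processed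
lemma rot_inv (flat : List Int) (shift : Int) (hn : flat ≠ []) (k : Nat) (hk : k ≤ flat.length) :
    ((PySem.List.pyRange 0 (k : Int) 1).foldl
      (fun acc i => PySem.List.pySetD acc (PySem.Int.mod (i + shift) (flat.length : Int))
        (PySem.List.pyGetD flat i 0))
      (List.replicate flat.length 0)).length = flat.length ∧
    ∀ j : Nat, j < flat.length →
      ((PySem.List.pyRange 0 (k : Int) 1).foldl
        (fun acc i => PySem.List.pySetD acc (PySem.Int.mod (i + shift) (flat.length : Int))
          (PySem.List.pyGetD flat i 0))
        (List.replicate flat.length 0)).getD j 0 =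
      if (((j : Int) - shift) % (flat.length : Int)).toNat < k
      then flat.getD ((((j : Int) - shift) % (flat.length : Int)).toNat) 0 else 0 := by
  have hnposN : 0 < flat.length := List.length_pos_of_ne_nil hn
  have hnpos : (0 : Int) < (flat.length : Int) := by exact_mod_cast hnposN
  induction k with
  | zero =>
    constructor
    · simp
    · intro j hj
      simp [List.getD_eq_getElem?_getD, hj]
  | succ k ih =>
    obtain ⟨ihlen, ihel⟩ := ih (by omega)
    have hcast : ((k + 1 : Nat) : Int) = ((k : Nat) : Int) + 1 := by push_cast; ring
    rw [hcast, PySem.List.pyRange_one_succ_right (by exact_mod_cast Nat.zero_le k),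
        List.foldl_append, List.foldl_cons, List.foldl_nil]
    set Ak := (PySem.List.pyRange 0 (k : Int) 1).foldl
      (fun acc i => PySem.List.pySetD acc (PySem.Int.mod (i + shift) (flat.length : Int))
        (PySem.List.pyGetD flat i 0))
      (List.replicate flat.length 0) with hAk
    set p := PySem.Int.mod ((k : Int) + shift) (flat.length : Int) with hp
    have hp0 : 0 ≤ p := PySem.Int.mod_nonneg _ hnpos
    have hpn : p < (flat.length : Int) := PySem.Int.mod_lt _ hnpos
    have hpemod : p = ((k : Int) + shift) % (flat.length : Int) :=
      PySem.Int.mod_eq_emod_of_pos hnpos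
    rw [PySem.List.pySetD_of_nonneg _ _ hp0]
    constructor
    · rw [List.length_set, ihlen]
    · intro j hj
      have hdvd1 : (flat.length : Int) ∣ (((j : Int) - shift) - ((j : Int) - shift) % (flat.length : Int)) :=
        Int.dvd_self_sub_emod
      have hdvd2 : (flat.length : Int) ∣ (((k : Int) + shift) - p) := by
        rw [hpemod]; exact Int.dvd_self_sub_emod
      set e := (((j : Int) - shift) % (flat.length : Int)) with he
      have he0 : 0 ≤ e := Int.emod_nonneg _ (by omega)
      have hen : e < (flat.length : Int) := Int.emod_lt_of_pos _ hnpos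
      have hiff : ((j : Int) = p) ↔ (e = (k : Int)) := by
        constructor
        · intro hjp
          have hd : (flat.length : Int) ∣ ((k : Int) - e) := by
            have := dvd_add hdvd1 hdvd2
            have heq : (((j : Int) - shift) - e) + (((k : Int) + shift) - p) = (k : Int) - e := by
              rw [hjp]; ring
            rwa [heq] at this
          have := Int.eq_zero_of_abs_lt_dvd hd (abs_lt.mpr ⟨by omega, by omega⟩)
          omega
        · intro hek
          have hd : (flat.length : Int) ∣ ((j : Int) - p) := by
            have := dvd_add hdvd1 hdvd2
            have heq : (((j : Int) - shift) - e) + (((k : Int) + shift) - p) = (j : Int) - p := by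
              rw [hek]; ring
            rwa [heq] at this
          have := Int.eq_zero_of_abs_lt_dvd hd (abs_lt.mpr ⟨by omega, by omega⟩)
          omega
      rw [List.getD_eq_getElem?_getD, List.getElem?_set]
      by_cases hjp : p.toNat = j
      · have hjpi : (j : Int) = p := by omega
        have hek : e = (k : Int) := hiff.mp hjpi
        rw [if_pos hjp, if_pos (by rw [ihlen]; omega)]
        have hvk : PySem.List.pyGetD flat (k : Int) 0 = flat.getD k 0 :=
          PySem.List.pyGetD_natCast _ _ _
        rw [if_pos (by omega)]
        simp only [Option.getD_some, hvk]
        congr 1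
        omega
      · have hjpi : (j : Int) ≠ p := by omega
        have hek : e ≠ (k : Int) := fun h => hjpi (hiff.mpr h)
        rw [if_neg hjp, ← List.getD_eq_getElem?_getD, ihel j hj]
        have : (e.toNat < k + 1) ↔ (e.toNat < k) := by omega
        simp only [this]
        rw [← he]

-- A's assignment loop computes the right rotation (drop/take form)
lemma rotA (flat : List Int) (shift : Int) (hn : flat ≠ []) :
    ((PySem.List.pyRange 0 (flat.length : Int) 1).foldl
      (fun acc i => PySem.List.pySetD acc (PySem.Int.mod (i + shift) (flat.length : Int))
        (PySem.List.pyGetD flat i 0))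
      (List.replicate flat.length 0))
    = flat.drop (flat.length - (shift % (flat.length : Int)).toNat) ++
        flat.take (flat.length - (shift % (flat.length : Int)).toNat) := by
  obtain ⟨hlen, hel⟩ := rot_inv flat shift hn flat.length le_rfl
  have hnposN : 0 < flat.length := List.length_pos_of_ne_nil hn
  have hnpos : (0 : Int) < (flat.length : Int) := by exact_mod_cast hnposN
  have hs0 : 0 ≤ shift % (flat.length : Int) := Int.emod_nonneg _ (by omega)
  have hsn : shift % (flat.length : Int) < (flat.length : Int) := Int.emod_lt_of_pos _ hnpos
  set s' := (shift % (flat.length : Int)).toNat with hs'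
  have hs'len : s' ≤ flat.length := by omega
  set d := flat.length - s' with hd
  have hlenR : (flat.drop d ++ flat.take d).length = flat.length := by
    simp [List.length_drop, List.length_take]; omega
  apply List.ext_getElem (by rw [hlen, hlenR])
  intro j hj1 hj2
  have hjlen : j < flat.length := by rwa [hlen] at hj1
  have hstep := hel j hjlen
  set e := (((j : Int) - shift) % (flat.length : Int)) with he
  have he0 : 0 ≤ e := Int.emod_nonneg _ (by omega)
  have hen : e < (flat.length : Int) := Int.emod_lt_of_pos _ hnpos
  rw [if_pos (by omega)] at hstep
  -- characterize e
  have hejn : e = ((j : Int) - (shift % (flat.length : Int))) % (flat.length : Int) := by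
    rw [he, Int.sub_emod]
    conv_rhs => rw [Int.sub_emod, Int.emod_emod_of_dvd _ dvd_rfl]
  have hechar : e.toNat = if j < s' then d + j else j - s' := by
    by_cases hcase : j < s'
    · rw [if_pos hcase]
      have : ((j : Int) - (shift % (flat.length : Int))) % (flat.length : Int)
          = (j : Int) - (shift % (flat.length : Int)) + (flat.length : Int) := by
        rw [← Int.add_emod_right]
        exact Int.emod_eq_of_lt (by omega) (by omega)
      rw [hejn, this] at he ⊢
      omega
    · rw [if_neg hcase]
      have : ((j : Int) - (shift % (flat.length : Int))) % (flat.length : Int)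
          = (j : Int) - (shift % (flat.length : Int)) :=
        Int.emod_eq_of_lt (by omega) (by omega)
      rw [hejn, this] at he ⊢
      omega
  have hdlen : (List.drop d flat).length = s' := by simp [List.length_drop]; omega
  rw [← List.getD_eq_getElem _ 0 hj1, hstep]
  rw [List.getElem_append]
  by_cases hcase : j < s'
  · rw [dif_pos (by rw [hdlen]; omega)]
    rw [List.getElem_drop, List.getD_eq_getElem _ 0 (by omega : e.toNat < flat.length)]
    exact getElem_congr rfl (by rw [hechar, if_pos hcase]) _
  · rw [dif_neg (by rw [hdlen]; omega)]
    rw [List.getElem_take, List.getD_eq_getElem _ 0 (by omega : e.toNat < flat.length)]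
    exact getElem_congr rfl (by rw [hdlen, hechar, if_neg hcase]) _

-- ===== VERDICT (by name: the statement is the Claim_ definition above) =====
theorem shift_array_spec : Claim_equal_shift_array := by
  intro array shift _dom hpre
  unfold Spec_shift_array shift_array shift_array_alt
  simp only []
  set flat := array.flatMap (fun sublist => sublist) with hflat
  set cN := (PySem.List.pyGetD array 0 []).length with hcN
  by_cases hc : cN = 0
  · rw [hc]
    norm_num
    exact foldA_zero _ [] [] 0 le_rfl
  · have hcpos : 0 < cN := Nat.pos_of_ne_zero hc
    rw [if_neg (by exact_mod_cast hc)]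
    have hA : ∀ L : List Int, (L.foldl (pvStepA (cN : Int)) ([], [], 0)).1 = pvChunks cN L := by
      intro L
      have h := foldA_pos cN hcpos L [] [] (by simpa using hcpos)
      simpa using h
    rw [hA]
    by_cases hf : flat = []
    · rw [hf]
      rw [pvChunks, if_neg (by simp; omega)]
      have h0 : PySem.Int.floordiv (((0:Nat) : Int)) (cN : Int) = 0 := by
        have h := PySem.Int.floordiv_natCast 0 cN
        simpa using h
      simp only [List.length_nil, Nat.cast_zero] at h0 ⊢
      rw [h0]
      simp [PySem.List.pyRange_of_pos _ _ (show (0:Int) < (cN:Int) by exact_mod_cast hcpos)]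
    · have hnposN : 0 < flat.length := List.length_pos_of_ne_nil hf
      have hnpos : (0 : Int) < (flat.length : Int) := by exact_mod_cast hnposN
      have hs0 : 0 ≤ shift % (flat.length : Int) := Int.emod_nonneg _ (by omega)
      have hsn : shift % (flat.length : Int) < (flat.length : Int) := Int.emod_lt_of_pos _ hnpos
      rw [rotA flat shift hf]
      rw [if_pos (by exact_mod_cast hnposN.ne')]
      rw [PySem.Int.mod_eq_emod_of_pos hnpos]
      rw [PySem.List.slice_from _ (by omega)]
      rw [PySem.List.slice_to _ (by omega)]
      have hidx : ((flat.length : Int) - shift % (flat.length : Int)).toNat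
          = flat.length - (shift % (flat.length : Int)).toNat := by omega
      rw [hidx]
      rw [← sliceChunks cN hcpos
        (flat.drop (flat.length - (shift % (flat.length : Int)).toNat) ++
          flat.take (flat.length - (shift % (flat.length : Int)).toNat))]
      have hRlen : (flat.drop (flat.length - (shift % (flat.length : Int)).toNat) ++
          flat.take (flat.length - (shift % (flat.length : Int)).toNat)).length = flat.length := by
        simp
      rw [hRlen]
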